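-- pv_equiv track=rewrite | github.com/Alikavaki/QuantumTriamondSimulation | triamond_lattice.py | screw_transformation
-- ===== SOURCE A (Python) =====
-- def screw_transformation(lst):
--     """
--     Applies the screw transformation to the list, shifting each element according to the screw transformation, Which is pi/2 rotation around x-axis and moving the entire lattice            along that axis one-fourth of a unit-cell.
--     """
--     chunk_size = 6  # (g, b, r, c, m, y) as one chunk
--     num_chunks = len(lst) // chunk_size
--
--     if len(lst) % chunk_size != 0:
--         raise ValueError("List length must be divisible by 6")
--
--     # Split the list into chunks
--     chunks = [lst[i * chunk_size:(i + 1) * chunk_size] for i in range(num_chunks)]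
--
--     # Create a new list to store the transformed result
--     transformed_lst = [None] * len(lst)
--
--     for i in range(num_chunks):
--         current_chunk = chunks[i]
--         next_chunk = chunks[(i + 1) % num_chunks]  # Wrap around for the last chunk
--
--         # Perform screw transformation
--         transformed_lst[i * chunk_size + 2] = current_chunk[0]  # 1st -> 3rd in the same chunk
--         transformed_lst[i * chunk_size + 5] = current_chunk[1]  # 2nd -> 6th in the same chunk
--         transformed_lst[(i + 1) % num_chunks * chunk_size + 4] = current_chunk[2]  # 3rd -> 5th in the next chunk
--         transformed_lst[(i + 1) % num_chunks * chunk_size + 0] = current_chunk[3]  # 4th -> 1st in the next chunk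
--         transformed_lst[i * chunk_size + 3] = current_chunk[4]  # 5th -> 4th in the same chunk
--         transformed_lst[(i + 1) % num_chunks * chunk_size + 1] = current_chunk[5]  # 6th -> 2nd in the next chunk
--
--     return transformed_lst
-- ===== SOURCE B (Python) =====
-- def screw_transformation(lst):
--     """Gather form of the screw transformation: each destination index pulls
--     its value directly from the inverse-mapped source index."""
--     num_chunks, rem = divmod(len(lst), 6)
--     if rem != 0:
--         raise ValueError("List length must be divisible by 6")
--
--     def source(d):
--         c, j = divmod(d, 6)
--         p = (c + num_chunks - 1) % num_chunks  # previous chunk, wrapping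
--         if j == 0:
--             return p * 6 + 3
--         if j == 1:
--             return p * 6 + 5
--         if j == 2:
--             return c * 6
--         if j == 3:
--             return c * 6 + 4
--         if j == 4:
--             return p * 6 + 2
--         return c * 6 + 1
--
--     return [lst[source(d)] for d in range(len(lst))]
-- ===== Notes on version B (the rewrite author's own statement) =====
-- stated objective: alternative
-- what changed: Replaces A's chunk-splitting and scatter into a None-prefilled buffer by a single gather comprehension that pulls each destination index directly from the inverse-mapped source index.
import Mathlib
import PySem

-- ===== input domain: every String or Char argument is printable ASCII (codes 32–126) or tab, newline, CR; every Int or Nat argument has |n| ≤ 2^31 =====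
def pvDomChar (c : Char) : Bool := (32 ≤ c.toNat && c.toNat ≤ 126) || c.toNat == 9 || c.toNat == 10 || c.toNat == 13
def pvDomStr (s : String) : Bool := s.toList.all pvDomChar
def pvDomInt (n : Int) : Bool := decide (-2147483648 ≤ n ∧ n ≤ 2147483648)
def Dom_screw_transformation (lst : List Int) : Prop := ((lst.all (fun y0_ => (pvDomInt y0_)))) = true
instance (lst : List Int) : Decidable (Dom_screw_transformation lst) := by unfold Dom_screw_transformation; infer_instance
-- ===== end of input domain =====

-- B replaces A's chunk-split + scatter into a None-prefilled buffer by a single gather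
-- comprehension pulling each destination from its inverse-mapped source (objective: alternative).

-- ===== PORT A =====
-- chunks = [lst[i*6:(i+1)*6] for i in range(num_chunks)]
def screwChunks (lst : List Int) : List (List Int) :=
  (List.range (lst.length / 6)).map (fun (i : Nat) =>
    PySem.List.slice lst (some ((i : Int) * 6)) (some (((i : Int) + 1) * 6)))

-- the body of A's for-loop: six indexed writes into the output buffer, in A's order
def screwStepA (chunks : List (List Int)) (num_chunks : Nat) (t : List Int) (i : Nat) : List Int :=
  let cur := chunks.getD i []          -- current_chunk = chunks[i]  (i < num_chunks always)
  let p := (i + 1) % num_chunks        -- the chunk index used for the "next chunk" writes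
  let t := t.set (i * 6 + 2) (cur.getD 0 0)
  let t := t.set (i * 6 + 5) (cur.getD 1 0)
  let t := t.set (p * 6 + 4) (cur.getD 2 0)
  let t := t.set (p * 6 + 0) (cur.getD 3 0)
  let t := t.set (i * 6 + 3) (cur.getD 4 0)
  let t := t.set (p * 6 + 1) (cur.getD 5 0)
  t

def screw_transformation (lst : List Int) : List Int :=
  -- chunk_size = 6, num_chunks = len(lst) // 6
  if lst.length % 6 ≠ 0 then []        -- Python raises ValueError here; excluded by Pre_
  else
    -- transformed_lst = [None] * len(lst): 0 stands for None; under Pre_ every slot is overwritten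
    (List.range (lst.length / 6)).foldl
      (screwStepA (screwChunks lst) (lst.length / 6))
      (List.replicate lst.length 0)

-- ===== PORT B =====
-- inverse map: the source index feeding destination index d
def screwSource (num : Nat) (d : Nat) : Nat :=
  let c := d / 6
  let j := d % 6
  let p := (c + num - 1) % num         -- previous chunk, wrapping
  if j = 0 then p * 6 + 3
  else if j = 1 then p * 6 + 5
  else if j = 2 then c * 6
  else if j = 3 then c * 6 + 4
  else if j = 4 then p * 6 + 2
  else c * 6 + 1

def screw_transformation_alt (lst : List Int) : List Int :=
  if lst.length % 6 ≠ 0 then []        -- ValueError; excluded by Pre_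
  else (List.range lst.length).map (fun d => lst.getD (screwSource (lst.length / 6) d) 0)

-- ===== PRECONDITION & SPEC =====
-- A raises ValueError unless the length is divisible by 6
def Pre_screw_transformation (lst : List Int) : Prop := lst.length % 6 = 0
instance (lst : List Int) : Decidable (Pre_screw_transformation lst) := by unfold Pre_screw_transformation; infer_instance
def pvWitness_screw_transformation : List Int := [1, 2, 3, 4, 5, 6]

def Spec_screw_transformation (lst : List Int) (out : List Int) : Prop := out = screw_transformation_alt lst
instance (lst : List Int) (out : List Int) : Decidable (Spec_screw_transformation lst out) := by unfold Spec_screw_transformation; infer_instance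

-- ===== CLAIM (what is proved, stated in full; the proofs are below) =====
def Claim_equal_screw_transformation : Prop := ∀ (lst : List Int), Dom_screw_transformation lst → Pre_screw_transformation lst → Spec_screw_transformation lst (screw_transformation lst)

-- ===== LEMMAS AND PROOFS =====

-- which destinations chunk i writes
def writesA (num i d : Nat) : Prop :=
  d = i * 6 + 2 ∨ d = i * 6 + 5 ∨ d = ((i + 1) % num) * 6 + 4 ∨
  d = ((i + 1) % num) * 6 + 0 ∨ d = i * 6 + 3 ∨ d = ((i + 1) % num) * 6 + 1

-- the value chunk i writes at destination d (the six positions are distinct mod 6)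
def valA (chunks : List (List Int)) (num i d : Nat) : Int :=
  let cur := chunks.getD i []
  if d = i * 6 + 2 then cur.getD 0 0
  else if d = i * 6 + 5 then cur.getD 1 0
  else if d = ((i + 1) % num) * 6 + 4 then cur.getD 2 0
  else if d = ((i + 1) % num) * 6 + 0 then cur.getD 3 0
  else if d = i * 6 + 3 then cur.getD 4 0
  else cur.getD 5 0

theorem length_screwStepA (chunks : List (List Int)) (num : Nat) (t : List Int) (i : Nat) :
    (screwStepA chunks num t i).length = t.length := by
  simp [screwStepA]

theorem foldl_length_screw (chunks : List (List Int)) (num : Nat) (l : List Nat) (t : List Int) :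
    (l.foldl (screwStepA chunks num) t).length = t.length := by
  induction l generalizing t with
  | nil => rfl
  | cons a r ih => simp only [List.foldl_cons]; rw [ih, length_screwStepA]

theorem screwStepA_get_not (chunks : List (List Int)) (num : Nat) (t : List Int) (i d : Nat)
    (h : ¬ writesA num i d) :
    (screwStepA chunks num t i)[d]? = t[d]? := by
  unfold writesA at h
  simp only [screwStepA]
  rw [List.getElem?_set_ne (by omega), List.getElem?_set_ne (by omega),
    List.getElem?_set_ne (by omega), List.getElem?_set_ne (by omega),
    List.getElem?_set_ne (by omega), List.getElem?_set_ne (by omega)]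

theorem screwStepA_get_writes (chunks : List (List Int)) (num : Nat) (t : List Int) (i d : Nat)
    (hd : d < t.length) (hw : writesA num i d) :
    (screwStepA chunks num t i)[d]? = some (valA chunks num i d) := by
  -- the six destinations have residues 2,5,4,0,3,1 mod 6, hence are pairwise distinct
  unfold writesA at hw
  unfold screwStepA valA

  rcases hw with h | h | h | h | h | h <;> subst h
  · rw [List.getElem?_set_ne (by omega), List.getElem?_set_ne (by omega),
      List.getElem?_set_ne (by omega), List.getElem?_set_ne (by omega),
      List.getElem?_set_ne (by omega), List.getElem?_set, if_pos rfl, if_pos (by simpa using hd), if_pos rfl]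
  · rw [List.getElem?_set_ne (by omega), List.getElem?_set_ne (by omega),
      List.getElem?_set_ne (by omega), List.getElem?_set_ne (by omega),
      List.getElem?_set, if_pos rfl, if_pos (by simpa using hd), if_neg (by omega), if_pos rfl]
  · rw [List.getElem?_set_ne (by omega), List.getElem?_set_ne (by omega),
      List.getElem?_set_ne (by omega),
      List.getElem?_set, if_pos rfl, if_pos (by simpa using hd), if_neg (by omega), if_neg (by omega), if_pos rfl]
  · rw [List.getElem?_set_ne (by omega), List.getElem?_set_ne (by omega),
      List.getElem?_set, if_pos rfl, if_pos (by simpa using hd), if_neg (by omega), if_neg (by omega),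
      if_neg (by omega), if_pos rfl]
  · rw [List.getElem?_set_ne (by omega),
      List.getElem?_set, if_pos rfl, if_pos (by simpa using hd), if_neg (by omega), if_neg (by omega),
      if_neg (by omega), if_neg (by omega), if_pos rfl]
  · rw [List.getElem?_set, if_pos rfl, if_pos (by simpa using hd), if_neg (by omega), if_neg (by omega),
      if_neg (by omega), if_neg (by omega), if_neg (by omega)]

theorem foldl_get_not (chunks : List (List Int)) (num : Nat) (l : List Nat) (t : List Int) (d : Nat)
    (h : ∀ j ∈ l, ¬ writesA num j d) :
    (l.foldl (screwStepA chunks num) t)[d]? = t[d]? := by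
  induction l generalizing t with
  | nil => rfl
  | cons a rest ih =>
    simp only [List.foldl_cons]
    rw [ih _ (fun j hj => h j (List.mem_cons_of_mem _ hj)),
      screwStepA_get_not _ _ _ _ _ (h a (List.mem_cons_self ..))]

theorem foldl_get_unique (chunks : List (List Int)) (num : Nat) (l : List Nat) (t : List Int)
    (d : Nat) (hd : d < t.length) (hnd : l.Nodup) (i : Nat) (hi : i ∈ l)
    (huniq : ∀ j ∈ l, writesA num j d → j = i) (hw : writesA num i d) :
    (l.foldl (screwStepA chunks num) t)[d]? = some (valA chunks num i d) := by
  induction l generalizing t with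
  | nil => cases hi
  | cons a rest ih =>
    simp only [List.foldl_cons]
    rcases List.mem_cons.mp hi with rfl | hmem
    · have hrest : ∀ j ∈ rest, ¬ writesA num j d := by
        intro j hj hwj
        have := huniq j (List.mem_cons_of_mem _ hj) hwj
        subst this
        exact (List.nodup_cons.mp hnd).1 hj
      rw [foldl_get_not _ _ _ _ _ hrest, screwStepA_get_writes _ _ _ _ _ hd hw]
    · have hne : a ≠ i := by
        rintro rfl
        exact (List.nodup_cons.mp hnd).1 hmem
      exact ih (screwStepA chunks num t a) (by rw [length_screwStepA]; exact hd)
        (List.nodup_cons.mp hnd).2 hmem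
        (fun j hj => huniq j (List.mem_cons_of_mem _ hj))

-- chunk i of A is the 6-window of lst starting at i*6
theorem chunk_eq (lst : List Int) (i : Nat) (hi : i < lst.length / 6) :
    (screwChunks lst).getD i [] = (lst.drop (i * 6)).take 6 := by
  unfold screwChunks
  rw [PySem.List.getD_map_range _ _ _ _ hi]
  have h1 : ((i : Int) + 1) * 6 = ((i : Int) * 6) + ((6 : Nat) : Int) := by push_cast; ring
  have h2 : ((i : Int) * 6) = ((i * 6 : Nat) : Int) := by push_cast; ring
  rw [h1, h2, PySem.List.slice_natCast_add]

theorem window_getD (lst : List Int) (m k : Nat) (hk : k < 6) :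
    ((lst.drop m).take 6).getD k 0 = lst.getD (m + k) 0 := by
  rw [List.getD_eq_getElem?_getD, List.getD_eq_getElem?_getD, List.getElem?_take_of_lt hk,
    List.getElem?_drop]

theorem mod_two_regions (num x : Nat) (h : x < 2 * num) :
    x % num = if x < num then x else x - num := by
  split_ifs with hx
  · exact Nat.mod_eq_of_lt hx
  · have hx2 : x = (x - num) + 1 * num := by omega
    have h2 : x % num = (x - num) % num := by
      conv_lhs => rw [hx2]
      rw [Nat.add_mul_mod_self_right]
    rw [h2, Nat.mod_eq_of_lt (by omega)]

-- for each destination d there is exactly one writer, and its value is B's gathered value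
theorem writer_spec (lst : List Int) (num d : Nat) (h6 : lst.length = 6 * num)
    (hd : d < lst.length) :
    ∃ i0, i0 < num ∧ writesA num i0 d ∧ (∀ k, k < num → writesA num k d → k = i0) ∧
      valA (screwChunks lst) num i0 d = lst.getD (screwSource num d) 0 := by
  have hnum : 0 < num := by omega
  have hc : d / 6 < num := by omega
  have hdc : d = d / 6 * 6 + d % 6 := by omega
  have hj6 : d % 6 < 6 := by omega
  have hplt : (d / 6 + num - 1) % num < num := Nat.mod_lt _ hnum
  have hpval : (d / 6 + num - 1) % num = if d / 6 = 0 then num - 1 else d / 6 - 1 := by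
    rw [mod_two_regions num _ (by omega)]; split_ifs <;> omega
  have hp1 : ((d / 6 + num - 1) % num + 1) % num = d / 6 := by
    rw [mod_two_regions num _ (by omega)]
    split_ifs at hpval ⊢ <;> omega
  have hnumdiv : lst.length / 6 = num := by omega
  have hjcase : d % 6 = 0 ∨ d % 6 = 1 ∨ d % 6 = 2 ∨ d % 6 = 3 ∨ d % 6 = 4 ∨ d % 6 = 5 := by omega
  rcases hjcase with hj | hj | hj | hj | hj | hj
  -- j = 0 : writer is the previous chunk p, value index 3
  · refine ⟨(d / 6 + num - 1) % num, hplt, ?_, ?_, ?_⟩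
    · unfold writesA; rw [hp1]; omega
    · intro k hk hwk
      unfold writesA at hwk
      rw [mod_two_regions num (k + 1) (by omega)] at hwk
      split_ifs at hwk <;> split_ifs at hpval <;> omega
    · unfold valA screwSource
      rw [chunk_eq lst _ (by omega), hp1]
      rw [if_neg (by omega), if_neg (by omega), if_neg (by omega), if_pos (by omega)]
      rw [if_pos hj, window_getD lst _ 3 (by omega)]
  -- j = 1 : writer is p, value index 5
  · refine ⟨(d / 6 + num - 1) % num, hplt, ?_, ?_, ?_⟩
    · unfold writesA; rw [hp1]; omega
    · intro k hk hwk
      unfold writesA at hwk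
      rw [mod_two_regions num (k + 1) (by omega)] at hwk
      split_ifs at hwk <;> split_ifs at hpval <;> omega
    · unfold valA screwSource
      rw [chunk_eq lst _ (by omega), hp1]
      rw [if_neg (by omega), if_neg (by omega), if_neg (by omega), if_neg (by omega),
        if_neg (by omega)]
      rw [if_neg (by omega), if_pos hj, window_getD lst _ 5 (by omega)]
  -- j = 2 : writer is the same chunk c, value index 0
  · refine ⟨d / 6, hc, ?_, ?_, ?_⟩
    · unfold writesA; omega
    · intro k hk hwk
      unfold writesA at hwk
      rw [mod_two_regions num (k + 1) (by omega)] at hwk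
      split_ifs at hwk <;> omega
    · unfold valA screwSource
      rw [chunk_eq lst _ (by omega)]
      rw [if_pos (by omega)]
      rw [if_neg (by omega), if_neg (by omega), if_pos hj, window_getD lst _ 0 (by omega)]
      norm_num
  -- j = 3 : writer is c, value index 4
  · refine ⟨d / 6, hc, ?_, ?_, ?_⟩
    · unfold writesA; omega
    · intro k hk hwk
      unfold writesA at hwk
      rw [mod_two_regions num (k + 1) (by omega)] at hwk
      split_ifs at hwk <;> omega
    · unfold valA screwSource
      rw [chunk_eq lst _ (by omega)]
      rw [if_neg (by omega), if_neg (by omega), if_neg (by omega), if_neg (by omega),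
        if_pos (by omega)]
      rw [if_neg (by omega), if_neg (by omega), if_neg (by omega), if_pos hj,
        window_getD lst _ 4 (by omega)]
  -- j = 4 : writer is p, value index 2
  · refine ⟨(d / 6 + num - 1) % num, hplt, ?_, ?_, ?_⟩
    · unfold writesA; rw [hp1]; omega
    · intro k hk hwk
      unfold writesA at hwk
      rw [mod_two_regions num (k + 1) (by omega)] at hwk
      split_ifs at hwk <;> split_ifs at hpval <;> omega
    · unfold valA screwSource
      rw [chunk_eq lst _ (by omega), hp1]
      rw [if_neg (by omega), if_neg (by omega), if_pos (by omega)]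
      rw [if_neg (by omega), if_neg (by omega), if_neg (by omega), if_neg (by omega),
        if_pos hj, window_getD lst _ 2 (by omega)]
  -- j = 5 : writer is c, value index 1
  · refine ⟨d / 6, hc, ?_, ?_, ?_⟩
    · unfold writesA; omega
    · intro k hk hwk
      unfold writesA at hwk
      rw [mod_two_regions num (k + 1) (by omega)] at hwk
      split_ifs at hwk <;> omega
    · unfold valA screwSource
      rw [chunk_eq lst _ (by omega)]
      rw [if_neg (by omega), if_pos (by omega)]
      rw [if_neg (by omega), if_neg (by omega), if_neg (by omega), if_neg (by omega),
        if_neg (by omega), window_getD lst _ 1 (by omega)]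

-- ===== VERDICT (by name: the statement is the Claim_ definition above) =====
theorem screw_transformation_spec : Claim_equal_screw_transformation := by
  intro lst _ hpre
  unfold Pre_screw_transformation at hpre
  unfold Spec_screw_transformation screw_transformation screw_transformation_alt
  rw [if_neg (by omega), if_neg (by omega)]
  have h6 : lst.length = 6 * (lst.length / 6) := by omega
  apply List.ext_getElem?
  intro d
  by_cases hd : d < lst.length
  · obtain ⟨i0, hi0, hw, huniq, hval⟩ := writer_spec lst (lst.length / 6) d h6 hd
    rw [foldl_get_unique (screwChunks lst) (lst.length / 6) (List.range (lst.length / 6))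
        (List.replicate lst.length 0) d (by simpa using hd) List.nodup_range i0
        (List.mem_range.mpr hi0) (fun j hj => huniq j (List.mem_range.mp hj)) hw,
      hval, List.getElem?_map, List.getElem?_range hd]
    rfl
  · rw [List.getElem?_eq_none (by rw [foldl_length_screw, List.length_replicate]; omega),
      List.getElem?_eq_none (by rw [List.length_map, List.length_range]; omega)]
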